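-- pv_equiv track=rewrite | github.com/dunnowhattogive/Advent-Of-Code | 2025/Day8/puzzle15.py | product_top3
-- ===== SOURCE A (Python) =====
-- def product_top3(nums):
-- 	if not nums:
-- 		return 1
-- 	nums = sorted(nums, reverse=True)
-- 	prod = 1
-- 	for i in range(min(3, len(nums))):
-- 		prod *= nums[i]
-- 	# if fewer than 3 components, treat missing ones as 1 (no change)
-- 	return prod
-- ===== SOURCE B (Python) =====
-- def product_top3(nums):
-- 	# One pass keeping only the (at most) three largest values, in descending
-- 	# order, instead of sorting the whole list.
-- 	top = []
-- 	for x in nums: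
-- 		i = 0
-- 		while i < len(top) and top[i] >= x:
-- 			i += 1
-- 		top.insert(i, x)
-- 		del top[3:]
-- 	prod = 1
-- 	for v in top:
-- 		prod *= v
-- 	return prod
-- ===== Notes on version B (the rewrite author's own statement) =====
-- stated objective: alternative
-- what changed: Replaces sorting the whole list with a single pass that maintains only the three largest values (a bounded insertion buffer), then multiplies them; asymptotically O(n) vs O(n log n) but slower in CPython, where sort runs in C.
import Mathlib
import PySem

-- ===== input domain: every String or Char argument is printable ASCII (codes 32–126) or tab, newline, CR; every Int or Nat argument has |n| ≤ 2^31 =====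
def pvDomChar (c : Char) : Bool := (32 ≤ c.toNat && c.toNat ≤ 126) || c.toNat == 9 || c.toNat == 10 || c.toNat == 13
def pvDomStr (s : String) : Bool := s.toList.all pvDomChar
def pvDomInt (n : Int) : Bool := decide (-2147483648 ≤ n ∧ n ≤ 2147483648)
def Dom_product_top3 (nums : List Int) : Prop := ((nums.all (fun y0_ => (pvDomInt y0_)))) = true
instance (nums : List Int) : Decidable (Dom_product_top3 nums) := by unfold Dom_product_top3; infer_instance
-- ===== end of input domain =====

-- B keeps only the three largest values in one pass instead of sorting the whole list.

-- ===== PORT A =====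
def product_top3 (nums : List Int) : Int :=
  if nums = [] then 1
  else
    -- nums = sorted(nums, reverse=True)  (rebinding, original list unchanged)
    let s := PySem.List.sorted nums (fun x => x) true
    -- for i in range(min(3, len(nums))): prod *= nums[i]
    -- the index i is always in range here, so pyGetD is exact for nums[i]
    (PySem.List.pyRange 0 (min 3 (s.length : Int)) 1).foldl
      (fun prod i => prod * PySem.List.pyGetD s i 1) 1

-- ===== PORT B =====
-- the `while i < len(top) and top[i] >= x` search followed by `top.insert(i, x)`
def pvInsDesc (x : Int) : List Int → List Int
  | [] => [x]
  | y :: t => if y ≥ x then y :: pvInsDesc x t else x :: y :: t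

def product_top3_alt (nums : List Int) : Int :=
  -- for x in nums: insert x at its descending position, then `del top[3:]`
  let top := nums.foldl (fun t x => (pvInsDesc x t).take 3) []
  -- prod = 1; for v in top: prod *= v
  top.foldl (fun prod v => prod * v) 1

-- ===== PRECONDITION & SPEC =====
def Spec_product_top3 (nums : List Int) (out : Int) : Prop := out = product_top3_alt nums
instance (nums : List Int) (out : Int) : Decidable (Spec_product_top3 nums out) := by unfold Spec_product_top3; infer_instance

-- ===== CLAIM (what is proved, stated in full; the proofs are below) =====
def Claim_equal_product_top3 : Prop := ∀ (nums : List Int), Dom_product_top3 nums → Spec_product_top3 nums (product_top3 nums)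

-- ===== LEMMAS AND PROOFS =====

theorem pvInsDesc_perm (x : Int) (t : List Int) : (pvInsDesc x t).Perm (x :: t) := by
  induction t with
  | nil => simp [pvInsDesc]
  | cons y t ih =>
      simp only [pvInsDesc]
      split
      · exact ((ih.cons y).trans (List.Perm.swap x y t))
      · exact List.Perm.refl _

theorem pvInsDesc_pairwise (x : Int) (t : List Int)
    (h : t.Pairwise (fun a b => b ≤ a)) : (pvInsDesc x t).Pairwise (fun a b => b ≤ a) := by
  induction t with
  | nil => simp [pvInsDesc]
  | cons y t ih =>
      rw [List.pairwise_cons] at h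
      simp only [pvInsDesc]
      split
      · rename_i hyx
        rw [List.pairwise_cons]
        refine ⟨?_, ih h.2⟩
        intro a ha
        have ha' := ((pvInsDesc_perm x t).mem_iff).mp ha
        rcases List.mem_cons.mp ha' with rfl | h'
        · omega
        · exact h.1 a h'
      · rename_i hyx
        push Not at hyx
        rw [List.pairwise_cons]
        refine ⟨?_, List.pairwise_cons.mpr h⟩
        intro a ha
        rcases List.mem_cons.mp ha with rfl | h'
        · omega
        · have := h.1 a h'; omega

theorem pvInsDesc_take (x : Int) (t : List Int) (n : Nat) :
    ((pvInsDesc x (t.take n)).take n) = (pvInsDesc x t).take n := by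
  induction t generalizing n with
  | nil => simp
  | cons y t ih =>
      cases n with
      | zero => simp
      | succ m =>
          simp only [List.take_succ_cons, pvInsDesc]
          split
          · simp only [List.take_succ_cons, ih m]
          · simp only [List.take_succ_cons, List.cons.injEq, true_and]
            cases m with
            | zero => simp
            | succ k =>
                simp only [List.take_succ_cons, List.cons.injEq, true_and,
                  List.take_take]
                congr 1
                omega

theorem pv_fold_take (l : List Int) (acc : List Int) :
    l.foldl (fun t x => (pvInsDesc x t).take 3) (acc.take 3)
      = (l.foldl (fun s x => pvInsDesc x s) acc).take 3 := by
  induction l generalizing acc with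
  | nil => rfl
  | cons x l ih =>
      simp only [List.foldl_cons]
      rw [pvInsDesc_take, ih]

theorem pv_isort_perm (l : List Int) (acc : List Int) :
    (l.foldl (fun s x => pvInsDesc x s) acc).Perm (acc ++ l) := by
  induction l generalizing acc with
  | nil => simp
  | cons x l ih =>
      simp only [List.foldl_cons]
      refine (ih (pvInsDesc x acc)).trans ?_
      refine (List.Perm.append_right l ((pvInsDesc_perm x acc))).trans ?_
      simpa using (List.perm_middle (a := x) (l₁ := acc) (l₂ := l)).symm

theorem pv_isort_pairwise (l : List Int) (acc : List Int)
    (h : acc.Pairwise (fun a b => b ≤ a)) :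
    (l.foldl (fun s x => pvInsDesc x s) acc).Pairwise (fun a b => b ≤ a) := by
  induction l generalizing acc with
  | nil => exact h
  | cons x l ih => exact ih _ (pvInsDesc_pairwise x acc h)

theorem pv_sorted_eq_isort (nums : List Int) :
    PySem.List.sorted nums (fun x => x) true
      = nums.foldl (fun s x => pvInsDesc x s) [] := by
  have hperm : (PySem.List.sorted nums (fun x => x) true).Perm
      (nums.foldl (fun s x => pvInsDesc x s) []) :=
    (PySem.List.sorted_perm nums (fun x => x) true).trans
      (pv_isort_perm nums []).symm
  exact hperm.eq_of_pairwise (fun a b _ _ h1 h2 => le_antisymm h2 h1)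
    (PySem.List.sorted_pairwise_rev nums (fun x => x))
    (pv_isort_pairwise nums [] (by simp))

theorem pv_range_prod (s : List Int) :
    (PySem.List.pyRange 0 (min 3 (s.length : Int)) 1).foldl
      (fun prod i => prod * PySem.List.pyGetD s i 1) 1
      = (s.take 3).foldl (fun prod v => prod * v) 1 := by
  match s with
  | [] => decide
  | [a] =>
      have h1 : min 3 ((([a] : List Int).length : Int)) = 1 := by simp
      have h2 : PySem.List.pyRange 0 1 1 = [0] := by decide
      rw [h1, h2]
      simp [PySem.List.pyGetD_zero_cons]
  | [a, b] =>
      have h1 : min 3 ((([a, b] : List Int).length : Int)) = 2 := by simp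
      have h2 : PySem.List.pyRange 0 2 1 = [0, 1] := by decide
      rw [h1, h2]
      simp [List.foldl, PySem.List.pyGetD_zero_cons]
      rw [show (1 : Int) = ((1 : Nat) : Int) by simp, PySem.List.pyGetD_natCast]
      simp
  | a :: b :: c :: r =>
      have h1 : min 3 (((a :: b :: c :: r : List Int).length : Int)) = 3 := by
        simp; omega
      have h2 : PySem.List.pyRange 0 3 1 = [0, 1, 2] := by decide
      rw [h1, h2]
      simp [List.foldl, PySem.List.pyGetD_zero_cons]
      rw [show (1 : Int) = ((1 : Nat) : Int) by simp, PySem.List.pyGetD_natCast,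
        show (2 : Int) = ((2 : Nat) : Int) by simp, PySem.List.pyGetD_natCast]
      simp [mul_assoc]

-- ===== VERDICT (by name: the statement is the Claim_ definition above) =====
theorem product_top3_spec : Claim_equal_product_top3 := by
  intro nums _
  unfold Spec_product_top3 product_top3 product_top3_alt
  by_cases hnil : nums = []
  · subst hnil; decide
  · simp only [if_neg hnil]
    rw [pv_range_prod, pv_sorted_eq_isort]
    have := pv_fold_take nums []
    simp only [List.take_nil] at this
    rw [← this]
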